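-- pv_equiv track=rewrite | github.com/Kargina/stepic_python_intro | 2/2_6_5.py | gen_ticket_number
-- ===== SOURCE A (Python) =====
-- def gen_ticket_number(count, series, length=6):
--     """
--     генератор номеров билетов, входные параметры: count - количество билетов,
--     series - номер серии, необязательный аргумент length - количество цифр
--     в номере, по умолчанию равен 6, выход - строка вида: <номер билета> <серия билета>
--     """
--     counter = 0
--     for b_ser in gen_series(series):
--         for b_num in gen_number(length):
--             if counter == count:
--                 break
--             ticket = f'{b_num} {b_ser}'
--             yield ticket
--             counter += 1
--
-- def gen_series(series):
--     """
--     генератор серий лотерейных билетов начиная с series по "ZZ" включительно, входные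
--     параметры: series -  - номер серии, выход - строка, состоящая из двух заглавных
--     букв латинского алфавита
--     """
--
--     alphabet = 'ABCDEFGHIJKLMNOPQRSTUVWXYZ'
--     first_char = series[0].upper()
--     first = alphabet.find(first_char)
--     second_char = series[1].upper()
--     second = alphabet.find(second_char)
--     for i in alphabet[first:]:
--         for j in alphabet[second:]:
--             yield(f'{i}{j}')
--         second = 0
--
-- def gen_number(length=6):
--     """
--     генератор номеров лотерейных билетов в одной серии, входные параметры:
--     необязательный аргумент length - количество цифр в номере, по умолчанию равен 6
--     """
--
--     max_num = (10 ** length - 1)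
--     for i in range(1, max_num+1):
--         yield str(i).zfill(length)
-- ===== SOURCE B (Python) =====
-- def gen_ticket_number(count, series, length=6):
--     """
--     Generator of lottery tickets 'NNN XY' for every series from `series` up to
--     'ZZ'.  The series pairs are materialised once with comprehensions (the first
--     row starts at the second letter, the remaining rows are full), then one flat
--     loop hands out ticket k by divmod: number within series, series pair.
--     """
--     alphabet = 'ABCDEFGHIJKLMNOPQRSTUVWXYZ'
--     rows = alphabet[alphabet.find(series[0].upper()):]
--     cols = alphabet[alphabet.find(series[1].upper()):]
--     pairs = [rows[0] + c for c in cols] + [r + c for r in rows[1:] for c in alphabet]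
--     per_series = 10 ** length - 1
--     for k in range(len(pairs) * per_series):
--         if k == count:
--             break
--         s, n = divmod(k, per_series)
--         yield f'{str(n + 1).zfill(length)} {pairs[s]}'
-- ===== Notes on version B (the rewrite author's own statement) =====
-- stated objective: alternative
-- what changed: Replaces the three nested yield-driven generators (series rows x numbers with a per-ticket break-counter) by: the series-pair list materialised once with comprehensions, then one flat indexed loop that hands out ticket k via divmod(k, per_series); Pre_ excludes only inputs where A itself raises (len(series) < 2: IndexError; length < 0: TypeError from range over a float).
import Mathlib
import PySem

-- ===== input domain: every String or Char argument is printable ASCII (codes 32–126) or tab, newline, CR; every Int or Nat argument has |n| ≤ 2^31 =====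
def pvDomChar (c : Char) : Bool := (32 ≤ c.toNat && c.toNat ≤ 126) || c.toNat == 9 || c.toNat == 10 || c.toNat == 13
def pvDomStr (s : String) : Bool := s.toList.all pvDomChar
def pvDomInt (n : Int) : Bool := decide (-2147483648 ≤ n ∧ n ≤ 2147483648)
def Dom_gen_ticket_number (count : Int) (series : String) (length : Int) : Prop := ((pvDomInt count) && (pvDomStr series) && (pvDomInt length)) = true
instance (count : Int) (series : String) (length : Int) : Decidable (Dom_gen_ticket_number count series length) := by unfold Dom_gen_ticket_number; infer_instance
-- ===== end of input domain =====

-- B replaces A's nested yield-driven generator loops by one flat indexed pass (divmod arithmetic); same tickets, same order.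

def pvAlph : List Char := "ABCDEFGHIJKLMNOPQRSTUVWXYZ".toList

-- ===== PORT A =====
-- The inner 'for b_num in gen_number(length): if counter == count: break; yield; counter += 1' loop,
-- with the lazy generator gen_number fused in: b_num = str(i).zfill(length) for i = 1..10**length-1,
-- pulled one at a time exactly as Python's generator protocol does (so the break stops the enumeration).
-- (Python's 10**length is the integer 10^length.toNat on Pre_'s 0 ≤ length; for length < 0 Python raises)
def pvInnerFrom (count : Int) (bser : List Char) (length maxNum : Int) (i : Int)
    (st : Int × List String) : Int × List String :=
  if i < maxNum + 1 then     -- gen_number still yields a b_num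
    if st.1 = count then st  -- break
    else pvInnerFrom count bser length maxNum (i + 1)
      (st.1 + 1, st.2 ++ [String.ofList (PySem.Chars.zfill (PySem.Int.toChars i) length ++ ' ' :: bser)])
  else st                    -- gen_number exhausted
termination_by (maxNum + 1 - i).toNat
decreasing_by omega

-- gen_series(series) after first/second are computed: state (second, acc), second reset to 0 after the first row
def pvGenSeries (first second : Int) : List (List Char) :=
  ((PySem.List.slice pvAlph (some first) none).foldl
    (fun (st : Int × List (List Char)) i =>
      (0, st.2 ++ (PySem.List.slice pvAlph (some st.1) none).map (fun j => [i, j])))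
    (second, [])).2

def gen_ticket_number (count : Int) (series : String) (length : Int) : List String :=
  match PySem.List.pyGet? series.toList 0, PySem.List.pyGet? series.toList 1 with
  | some c0, some c1 =>
      let first := PySem.Chars.find pvAlph (PySem.Chars.upper [c0])
      let second := PySem.Chars.find pvAlph (PySem.Chars.upper [c1])
      ((pvGenSeries first second).foldl
        (fun st bser => pvInnerFrom count bser length (10 ^ length.toNat - 1) 1 st)
        ((0 : Int), ([] : List String))).2
  | _, _ => []   -- series[0] / series[1] raised IndexError: excluded by Pre_

-- ===== PORT B =====
def pvAlphB : List Char := "ABCDEFGHIJKLMNOPQRSTUVWXYZ".toList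

-- 'for k in range(total): if k == count: break; yield f(k)' — the flat loop with its break, one step per k
def pvForK (count total : Int) (f : Int → String) (k : Int) : List String :=
  if k < total then
    if k = count then []
    else f k :: pvForK count total f (k + 1)
  else []
termination_by (total - k).toNat
decreasing_by omega

def gen_ticket_number_alt (count : Int) (series : String) (length : Int) : List String :=
  match PySem.List.pyGet? series.toList 0 with
  | none => []   -- series[0] raised IndexError: excluded by Pre_
  | some c0 =>
    match PySem.List.pyGet? series.toList 1 with
    | none => []   -- series[1] raised IndexError: excluded by Pre_
    | some c1 =>
      let rows := PySem.List.slice pvAlphB (some (PySem.Chars.find pvAlphB (PySem.Chars.upper [c0]))) none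
      let cols := PySem.List.slice pvAlphB (some (PySem.Chars.find pvAlphB (PySem.Chars.upper [c1]))) none
      -- rows[0] never raises: a slice of the alphabet from find's result (≤ 25) is nonempty
      let pairs : List (List Char) :=
        cols.map (fun c => [PySem.List.pyGetD rows 0 ' ', c])
          ++ (PySem.List.slice rows (some 1) none).flatMap (fun r => pvAlphB.map (fun c => [r, c]))
      let per : Int := 10 ^ length.toNat - 1
      pvForK count ((pairs.length : Int) * per) (fun k =>
        let s := PySem.Int.floordiv k per
        let n := PySem.Int.mod k per
        -- pairs[s] never raises: 0 ≤ s < len(pairs) for k in range(len(pairs)*per)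
        String.ofList (PySem.Chars.zfill (PySem.Int.toChars (n + 1)) length
          ++ ' ' :: PySem.List.pyGetD pairs s [])) 0

-- ===== PRECONDITION & SPEC =====
-- A raises IndexError when len(series) < 2, and TypeError when length < 0 (10**length is then a float,
-- and range(1, float) raises); exactly those inputs are excluded.
def Pre_gen_ticket_number (count : Int) (series : String) (length : Int) : Prop :=
  2 ≤ series.toList.length ∧ 0 ≤ length
instance (count : Int) (series : String) (length : Int) : Decidable (Pre_gen_ticket_number count series length) := by unfold Pre_gen_ticket_number; infer_instance

def pvWitness_gen_ticket_number : Int × String × Int := (3, "bC", 1)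

def Spec_gen_ticket_number (count : Int) (series : String) (length : Int) (out : List String) : Prop := out = gen_ticket_number_alt count series length
instance (count : Int) (series : String) (length : Int) (out : List String) : Decidable (Spec_gen_ticket_number count series length out) := by unfold Spec_gen_ticket_number; infer_instance

-- ===== CLAIM (what is proved, stated in full; the proofs are below) =====
def Claim_equal_gen_ticket_number : Prop := ∀ (count : Int) (series : String) (length : Int), Dom_gen_ticket_number count series length → Pre_gen_ticket_number count series length → Spec_gen_ticket_number count series length (gen_ticket_number count series length)

-- ===== LEMMAS AND PROOFS =====

lemma pvAlph_len : pvAlph.length = 26 := by decide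

lemma pvAlphB_eq : pvAlphB = pvAlph := rfl

-- l equals the range-indexed map of its own entries
lemma pv_eq_range_map_getD {β : Type} (l : List β) (e : β) :
    (List.range l.length).map (fun k => l.getD k e) = l := by
  apply List.ext_getElem (by simp)
  intro i h1 h2
  simp [List.getD_eq_getElem?_getD, List.getElem?_eq_getElem, h2]

-- getD through map (in-range)
lemma pv_getD_map {β γ : Type} (l : List β) (f : β → γ) (m : Nat) (d : β) (e : γ)
    (hm : m < l.length) :
    (l.map f).getD m e = f (l.getD m d) := by
  simp [List.getD_eq_getElem?_getD, List.getElem?_eq_getElem, hm]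

-- getD through drop (in-range)
lemma pv_getD_drop {β : Type} (l : List β) (a m : Nat) (d : β) (hm : a + m < l.length) :
    (l.drop a).getD m d = l.getD (a + m) d := by
  have hm' : m < (l.drop a).length := by simp; omega
  simp [List.getD_eq_getElem?_getD, List.getElem?_eq_getElem, hm, hm', List.getElem_drop]

-- a uniform-block flatMap is a divmod-indexed map over a single range
lemma pv_flat_uniform {α β : Type} (bs : List α) (g : α → List β) (per : Nat) (d : α) (e : β)
    (h : ∀ x ∈ bs, (g x).length = per) :
    bs.flatMap g =
      (List.range (bs.length * per)).map (fun k => (g (bs.getD (k / per) d)).getD (k % per) e) := by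
  rcases Nat.eq_zero_or_pos per with hper | hper
  · subst hper
    simp only [Nat.mul_zero, List.range_zero, List.map_nil]
    rw [List.flatMap_eq_nil_iff]
    exact fun x hx => List.eq_nil_of_length_eq_zero (h x hx)
  · induction bs with
    | nil => simp
    | cons b bs ih =>
      have hb : (g b).length = per := h b (by simp)
      have hlen : (b :: bs).length * per = per + bs.length * per := by
        simp [List.length_cons, Nat.succ_mul, Nat.add_comm]
      rw [List.flatMap_cons, hlen, List.range_add, List.map_append, List.map_map]
      congr 1
      · have hgb := pv_eq_range_map_getD (g b) e
        rw [hb] at hgb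
        rw [← hgb]
        apply List.map_congr_left
        intro k hk
        have hk' : k < per := List.mem_range.mp hk
        simp [Nat.div_eq_of_lt hk', Nat.mod_eq_of_lt hk']
      · rw [ih (fun x hx => h x (by simp [hx]))]
        apply List.map_congr_left
        intro k _
        have h1 : (per + k) / per = k / per + 1 := by
          rw [Nat.add_comm, Nat.add_div_right _ hper]
        have h2 : (per + k) % per = k % per := by
          rw [Nat.add_comm, Nat.add_mod_right]
        simp [Function.comp, h1, h2]

-- append of two range-maps is one range-map with a branch
lemma pv_range_map_append {γ : Type} (u v : Nat → γ) (R M : Nat) :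
    (List.range R).map u ++ (List.range M).map v =
      (List.range (R + M)).map (fun s => if s < R then u s else v (s - R)) := by
  rw [List.range_add, List.map_append, List.map_map]
  congr 1
  · exact (List.map_congr_left (fun k hk => by simp [List.mem_range.mp hk])).symm
  · exact List.map_congr_left (fun k hk => by simp)

-- drop as a range-map
lemma pv_drop_eq_range_map {β : Type} (l : List β) (a : Nat) (d : β) :
    l.drop a = (List.range (l.length - a)).map (fun t => l.getD (a + t) d) := by
  conv_lhs => rw [← pv_eq_range_map_getD (l.drop a) d]
  rw [List.length_drop]
  exact List.map_congr_left (fun t ht => pv_getD_drop l a t d (by have := List.mem_range.mp ht; omega))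

-- ---- A-side normal forms ----

-- the inner loop, list form: consuming a materialised list of numbers
def pvInner (count : Int) (bser : List Char) : List (List Char) → Int × List String → Int × List String
  | [], st => st
  | bnum :: rest, st =>
    if st.1 = count then st
    else pvInner count bser rest (st.1 + 1, st.2 ++ [String.ofList (bnum ++ ' ' :: bser)])

lemma pvInnerFrom_eq (count : Int) (bser : List Char) (length maxNum : Int) :
    ∀ (i : Int) (st : Int × List String),
      pvInnerFrom count bser length maxNum i st =
        pvInner count bser
          ((PySem.List.pyRange i (maxNum + 1) 1).map
            (fun x => PySem.Chars.zfill (PySem.Int.toChars x) length)) st := by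
  intro i st
  rcases st with ⟨counter, acc⟩
  induction hn : (maxNum + 1 - i).toNat generalizing i counter acc with
  | zero =>
    rw [pvInnerFrom, if_neg (by omega), PySem.List.pyRange_one_eq_nil (by omega)]
    simp [pvInner]
  | succ n ih =>
    rw [pvInnerFrom, if_pos (by omega), PySem.List.pyRange_one_cons (by omega)]
    simp only [List.map_cons]
    rw [pvInner]
    simp only
    by_cases hc : counter = count
    · rw [if_pos hc, if_pos hc]
    · rw [if_neg hc, if_neg hc, ih (i + 1) _ _ (by omega)]

def pvTag (bser bnum : List Char) : String := String.ofList (bnum ++ ' ' :: bser)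

def pvFull (nums sl : List (List Char)) : List String :=
  sl.flatMap (fun b => nums.map (fun n => pvTag b n))

lemma pv_fold_zero :
    ∀ (l : List Char) (acc : List (List Char)),
      ((l.foldl (fun (st : Int × List (List Char)) i =>
          (0, st.2 ++ (PySem.List.slice pvAlph (some st.1) none).map (fun j => [i, j])))
        (0, acc)).2 = acc ++ l.flatMap (fun i => pvAlph.map (fun j => [i, j]))) := by
  intro l
  induction l with
  | nil => simp
  | cons c l ih =>
    intro acc
    simp only [List.foldl_cons, List.flatMap_cons]
    rw [PySem.List.slice_zero_start, PySem.List.slice_none_none, ih, List.append_assoc]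

lemma pv_genSeries_nf (F S : Int) (f0 s0 : Nat) (hf : f0 < 26)
    (hF : PySem.List.slice pvAlph (some F) none = pvAlph.drop f0)
    (hS : PySem.List.slice pvAlph (some S) none = pvAlph.drop s0) :
    pvGenSeries F S =
      (pvAlph.drop s0).map (fun j => [pvAlph.getD f0 ' ', j])
        ++ (pvAlph.drop (f0 + 1)).flatMap (fun i => pvAlph.map (fun j => [i, j])) := by
  have hlt : f0 < pvAlph.length := by rw [pvAlph_len]; exact hf
  have hdrop : pvAlph.drop f0 = pvAlph.getD f0 ' ' :: pvAlph.drop (f0 + 1) := by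
    rw [List.getD_eq_getElem _ _ hlt]
    exact List.drop_eq_getElem_cons hlt
  unfold pvGenSeries
  rw [hF, hdrop]
  simp only [List.foldl_cons]
  rw [hS, pv_fold_zero]
  simp

lemma pv_inner_neg (count : Int) (hc : count < 0) (b : List Char) :
    ∀ (nums : List (List Char)) (counter : Int) (acc : List String), 0 ≤ counter →
      pvInner count b nums (counter, acc) =
        (counter + nums.length, acc ++ nums.map (fun n => pvTag b n)) := by
  intro nums
  induction nums with
  | nil => intro counter acc h; simp [pvInner]
  | cons n rest ih =>
    intro counter acc h
    rw [pvInner]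
    simp only
    rw [if_neg (by omega), ih (counter + 1) _ (by omega)]
    simp [pvTag, List.length_cons]
    omega

lemma pv_inner_nonneg (count : Int) (hc : 0 ≤ count) (b : List Char) :
    ∀ (nums : List (List Char)) (counter : Int) (acc : List String), counter ≤ count →
      pvInner count b nums (counter, acc) =
        (min count (counter + nums.length),
         acc ++ (nums.take (count - counter).toNat).map (fun n => pvTag b n)) := by
  intro nums
  induction nums with
  | nil =>
    intro counter acc h
    simp [pvInner]
    omega
  | cons n rest ih =>
    intro counter acc h
    rw [pvInner]
    simp only
    by_cases heq : counter = count
    · rw [if_pos heq]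
      have : (count - counter).toNat = 0 := by omega
      simp [this, heq]
      omega
    · rw [if_neg heq, ih (counter + 1) _ (by omega)]
      have h1 : (count - counter).toNat = (count - (counter + 1)).toNat + 1 := by omega
      rw [h1]
      simp [pvTag, List.take_succ_cons, List.length_cons]
      omega

lemma pv_outer_neg (count : Int) (hc : count < 0) (nums : List (List Char)) :
    ∀ (sl : List (List Char)) (counter : Int) (acc : List String), 0 ≤ counter →
      (sl.foldl (fun st bser => pvInner count bser nums st) (counter, acc)).2 =
        acc ++ pvFull nums sl := by
  intro sl
  induction sl with
  | nil => intro counter acc h; simp [pvFull]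
  | cons b sl ih =>
    intro counter acc h
    simp only [List.foldl_cons]
    rw [pv_inner_neg count hc b nums counter acc h, ih _ _ (by positivity)]
    simp [pvFull, List.append_assoc]

lemma pv_outer_nonneg (count : Int) (hc : 0 ≤ count) (nums : List (List Char)) :
    ∀ (sl : List (List Char)) (counter : Int) (acc : List String), counter ≤ count →
      (sl.foldl (fun st bser => pvInner count bser nums st) (counter, acc)).2 =
        acc ++ (pvFull nums sl).take ((count - counter).toNat) := by
  intro sl
  induction sl with
  | nil => intro counter acc h; simp [pvFull]
  | cons b sl ih =>
    intro counter acc h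
    simp only [List.foldl_cons]
    rw [pv_inner_nonneg count hc b nums counter acc h, ih _ _ (by omega)]
    simp only [pvFull, List.flatMap_cons]
    rw [List.take_append, List.append_assoc]
    congr 2
    · rw [← List.map_take]
    · congr 1
      simp
      omega

-- ---- find: with a nonempty needle it returns -1 or an index below the haystack length ----
lemma pv_find_go_bounds (sub : List Char) (hsub : sub ≠ []) :
    ∀ (s : List Char) (k : Nat), PySem.Chars.find.go sub s k = -1 ∨
      ∃ m : Nat, PySem.Chars.find.go sub s k = (m : Int) ∧ k ≤ m ∧ m < k + s.length := by
  intro s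
  induction s with
  | nil =>
    intro k
    left
    rw [PySem.Chars.find.go]
    simp [List.isEmpty_iff, hsub]
  | cons c t ih =>
    intro k
    rw [PySem.Chars.find.go]
    by_cases hp : sub.isPrefixOf (c :: t) = true
    · right
      exact ⟨k, by simp [hp], le_refl k, by simp⟩
    · rcases ih (k + 1) with h1 | ⟨m, hm, h2, h3⟩
      · left; simp [hp, h1]
      · right; exact ⟨m, by simp [hp, hm], by omega, by simp; omega⟩

lemma pv_find_bounds (sub : List Char) (hsub : sub ≠ []) :
    PySem.Chars.find pvAlph sub = -1 ∨
      ∃ m : Nat, PySem.Chars.find pvAlph sub = (m : Int) ∧ m < 26 := by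
  rcases pv_find_go_bounds sub hsub pvAlph 0 with h | ⟨m, hm, _, h3⟩
  · left; exact h
  · right; exact ⟨m, hm, by simpa using h3⟩

-- normalisation of a find result: the slice from it is a drop at one index f0 < 26
lemma pv_idx_facts (F : Int) (h : F = -1 ∨ ∃ m : Nat, F = (m : Int) ∧ m < 26) :
    ∃ f0 : Nat, f0 < 26 ∧ PySem.List.slice pvAlph (some F) none = pvAlph.drop f0 := by
  rcases h with rfl | ⟨m, rfl, hm⟩
  · exact ⟨25, by norm_num, by rw [PySem.List.slice_from_neg_one, pvAlph_len]⟩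
  · refine ⟨m, hm, ?_⟩
    rw [PySem.List.slice_from _ (by positivity)]
    simp

-- ---- B-side: the break-loop over range(total) is a takeWhile over the range ----
lemma pvForK_eq (count total : Int) (f : Int → String) : ∀ (k : Int),
    pvForK count total f k =
      ((PySem.List.pyRange k total 1).takeWhile (fun x => x != count)).map f := by
  intro k
  induction hn : (total - k).toNat generalizing k with
  | zero =>
    rw [pvForK, if_neg (by omega), PySem.List.pyRange_one_eq_nil (by omega)]
    simp
  | succ n ih =>
    rw [pvForK, if_pos (by omega), PySem.List.pyRange_one_cons (by omega)]
    by_cases hc : k = count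
    · rw [if_pos hc]
      have hp : (k != count) = false := by simp [hc]
      simp [List.takeWhile, hp]
    · rw [if_neg hc]
      have hp : (k != count) = true := by simp [hc]
      simp only [List.takeWhile, hp, List.map_cons]
      rw [ih (k + 1) (by omega)]

lemma pv_takeWhile_range (c : Int) : ∀ (n : Nat),
    (List.range n).takeWhile (fun k => ((k : Nat) : Int) != c) =
      List.range (if 0 ≤ c ∧ c < (n : Int) then c.toNat else n) := by
  intro n
  induction n with
  | zero =>
    have h0 : (if 0 ≤ c ∧ c < ((0:Nat) : Int) then c.toNat else (0:Nat)) = 0 := by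
      split_ifs <;> omega
    rw [h0]
    simp
  | succ n ih =>
    rw [List.range_succ, List.takeWhile_append, ih]
    by_cases hc : 0 ≤ c ∧ c < (n : Int)
    · rw [if_pos hc, if_pos (⟨hc.1, by push_cast; omega⟩ : 0 ≤ c ∧ c < ((n+1 : Nat) : Int))]
      rw [if_neg (by simp [List.length_range]; omega)]
    · rw [if_neg hc]
      rw [if_pos (by simp)]
      by_cases hc' : c = (n : Int)
      · have hn : (if 0 ≤ c ∧ c < ((n+1 : Nat) : Int) then c.toNat else (n+1:Nat)) = n := by
          rw [if_pos (by push_cast; omega)]; omega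
        rw [hn]
        have hp : (((n : Nat) : Int) != c) = false := by simp [hc']
        simp [List.takeWhile, hp]
      · have hn : (if 0 ≤ c ∧ c < ((n+1 : Nat) : Int) then c.toNat else (n+1:Nat)) = n+1 := by
          rw [if_neg (by push_cast; omega)]
        rw [hn]
        have hp : (((n : Nat) : Int) != c) = true := by simp; omega
        simp [List.takeWhile, hp, List.range_succ]

-- ===== VERDICT (by name: the statement is the Claim_ definition above) =====
theorem gen_ticket_number_spec : Claim_equal_gen_ticket_number := by
  intro count series length _hdom hpre
  unfold Spec_gen_ticket_number
  obtain ⟨hlen2, hlenpos⟩ := hpre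
  obtain ⟨c0, c1, rest, hs⟩ : ∃ c0 c1 rest, series.toList = c0 :: c1 :: rest := by
    rcases hl : series.toList with _ | ⟨a, _ | ⟨b, r⟩⟩ <;> rw [hl] at hlen2 <;> simp at hlen2
    · exact ⟨a, b, r, rfl⟩
  have hg0 : PySem.List.pyGet? series.toList 0 = some c0 := by
    rw [hs]; simp [PySem.List.pyGet?, PySem.List.pyIdx?,
      show (0:Int) ≤ (rest.length:Int) + 1 + 1 by positivity,
      show (0:Int) ≤ (rest.length:Int) + 1 by positivity]
  have hg1 : PySem.List.pyGet? series.toList 1 = some c1 := by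
    rw [hs]; simp [PySem.List.pyGet?, PySem.List.pyIdx?,
      show (0:Int) ≤ (rest.length:Int) + 1 + 1 by positivity,
      show (0:Int) ≤ (rest.length:Int) + 1 by positivity]
  obtain ⟨f0, hf, hsliceF⟩ :=
    pv_idx_facts _ (pv_find_bounds (PySem.Chars.upper [c0]) (by simp [PySem.Chars.upper]))
  obtain ⟨s0, hsn, hsliceS⟩ :=
    pv_idx_facts _ (pv_find_bounds (PySem.Chars.upper [c1]) (by simp [PySem.Chars.upper]))
  -- abbreviations
  set perN : Nat := 10 ^ length.toNat - 1 with hperN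
  have h10 : 1 ≤ 10 ^ length.toNat := Nat.one_le_pow _ _ (by norm_num)
  have hperC : (10:Int) ^ length.toNat - 1 = (perN : Int) := by
    rw [hperN, Nat.cast_sub h10]; push_cast; ring
  set R : Nat := 26 - s0 with hR
  set M : Nat := (25 - f0) * 26 with hM
  set tot : Nat := (R + M) * perN with htot
  set limitN : Nat := if count < 0 then tot else min count.toNat tot with hlimitN
  have hlimle : limitN ≤ tot := by rw [hlimitN]; split <;> omega
  -- numbers list in range form
  have hnums : (PySem.List.pyRange 1 ((10:Int) ^ length.toNat - 1 + 1) 1).map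
        (fun x => PySem.Chars.zfill (PySem.Int.toChars x) length) =
      (List.range perN).map (fun (t : Nat) => PySem.Chars.zfill (PySem.Int.toChars ((t:Int) + 1)) length) := by
    rw [PySem.List.pyRange_one, List.map_map]
    have harg : ((10:Int) ^ length.toNat - 1 + 1 - 1).toNat = perN := by
      rw [show (10:Int) ^ length.toNat - 1 + 1 - 1 = (10:Int) ^ length.toNat - 1 by ring, hperC]
      simp
    rw [harg]
    exact List.map_congr_left (fun t _ => by
      simp [Function.comp, show (1:Int) + (t:Int) = (t:Int) + 1 by ring])
  -- series-pair list in range form (shared by A's gen_series and B's pairs)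
  set sv : Nat → List Char := fun s =>
    if s < R then [pvAlph.getD f0 ' ', pvAlph.getD (s0 + s) ' ']
    else [pvAlph.getD (f0 + 1 + (s - R) / 26) ' ', pvAlph.getD ((s - R) % 26) ' '] with hsv
  have hpairsNF : (pvAlph.drop s0).map (fun j => [pvAlph.getD f0 ' ', j])
        ++ (pvAlph.drop (f0 + 1)).flatMap (fun i => pvAlph.map (fun j => [i, j])) =
      (List.range (R + M)).map sv := by
    have hrow : (pvAlph.drop s0).map (fun j => [pvAlph.getD f0 ' ', j]) =
        (List.range R).map (fun t => [pvAlph.getD f0 ' ', pvAlph.getD (s0 + t) ' ']) := by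
      rw [pv_drop_eq_range_map pvAlph s0 ' ', List.map_map, pvAlph_len]
      rfl
    have hrest : (pvAlph.drop (f0 + 1)).flatMap (fun i => pvAlph.map (fun j => [i, j])) =
        (List.range M).map (fun r =>
          [pvAlph.getD (f0 + 1 + r / 26) ' ', pvAlph.getD (r % 26) ' ']) := by
      rw [pv_flat_uniform (pvAlph.drop (f0 + 1)) _ 26 ' ' ([] : List Char)
        (fun x _ => by simp [pvAlph_len])]
      have hlen' : (pvAlph.drop (f0 + 1)).length = 25 - f0 := by
        rw [List.length_drop, pvAlph_len]; omega
      rw [hlen', ← hM]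
      apply List.map_congr_left
      intro r hr
      have hr' : r < M := List.mem_range.mp hr
      have hdiv : r / 26 < 25 - f0 := by
        rw [hM] at hr'
        exact (Nat.div_lt_iff_lt_mul (by norm_num : 0 < 26)).mpr hr'
      rw [pv_getD_map pvAlph _ (r % 26) ' ' _
        (by rw [pvAlph_len]; exact Nat.mod_lt _ (by norm_num))]
      rw [pv_getD_drop pvAlph (f0 + 1) (r / 26) ' ' (by rw [pvAlph_len]; omega)]
    rw [hrow, hrest, pv_range_map_append]
  have hseries : pvGenSeries (PySem.Chars.find pvAlph (PySem.Chars.upper [c0]))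
      (PySem.Chars.find pvAlph (PySem.Chars.upper [c1])) = (List.range (R + M)).map sv := by
    rw [pv_genSeries_nf _ _ f0 s0 hf hsliceF hsliceS]
    exact hpairsNF
  -- the full (uncapped) ticket list in range form
  set fA : Nat → String := fun k =>
    pvTag (sv (k / perN)) (PySem.Chars.zfill (PySem.Int.toChars (((k % perN : Nat) : Int) + 1)) length)
    with hfA
  have hfull : pvFull ((List.range perN).map
        (fun (t : Nat) => PySem.Chars.zfill (PySem.Int.toChars ((t:Int) + 1)) length))
      ((List.range (R + M)).map sv) = (List.range tot).map fA := by
    unfold pvFull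
    rw [pv_flat_uniform _ _ perN ([] : List Char) "" (fun x _ => by simp)]
    rw [List.length_map, List.length_range, ← htot]
    apply List.map_congr_left
    intro k hk
    have hk' : k < tot := List.mem_range.mp hk
    have hperpos : 0 < perN := by
      rcases Nat.eq_zero_or_pos perN with h0 | h0
      · rw [htot, h0, Nat.mul_zero] at hk'; omega
      · exact h0
    have hdivlt : k / perN < R + M := by
      rw [htot] at hk'
      exact (Nat.div_lt_iff_lt_mul hperpos).mpr hk'
    rw [PySem.List.getD_map_range _ _ _ _ hdivlt]
    rw [pv_getD_map _ _ (k % perN) ([] : List Char) _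
      (by simp; exact Nat.mod_lt _ hperpos)]
    rw [PySem.List.getD_map_range _ _ _ _ (Nat.mod_lt _ hperpos)]
  -- A reduces to a take of the full list
  have hA : gen_ticket_number count series length = ((List.range tot).map fA).take limitN := by
    unfold gen_ticket_number
    rw [hg0, hg1]
    dsimp only
    simp only [pvInnerFrom_eq, hnums]
    have hlenfull : ((List.range tot).map fA).length = tot := by simp
    rcases lt_or_ge count 0 with hneg | hpos
    · rw [pv_outer_neg count hneg _ _ 0 [] le_rfl, List.nil_append, hseries, hfull]
      rw [hlimitN, if_pos hneg]
      exact (List.take_of_length_le (le_of_eq hlenfull)).symm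
    · rw [pv_outer_nonneg count hpos _ _ 0 [] hpos, List.nil_append, hseries, hfull]
      rw [hlimitN, if_neg (by omega)]
      rcases le_or_gt count.toNat tot with hcm | hcm
      · rw [min_eq_left hcm]
        congr 1
        omega
      · rw [min_eq_right (by omega)]
        rw [List.take_of_length_le (by rw [hlenfull]; omega), List.take_of_length_le (le_of_eq hlenfull)]
  -- B reduces to a map over the same range
  have hrows0 : PySem.List.pyGetD (pvAlph.drop f0) 0 ' ' = pvAlph.getD f0 ' ' := by
    rw [show (0 : Int) = ((0 : Nat) : Int) by norm_num, PySem.List.pyGetD_natCast]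
    rw [pv_getD_drop pvAlph f0 0 ' ' (by rw [pvAlph_len]; omega)]
    norm_num
  have hrows1 : PySem.List.slice (pvAlph.drop f0) (some 1) none = pvAlph.drop (f0 + 1) := by
    rw [PySem.List.slice_from _ (by norm_num)]
    simp [List.drop_drop]
  have hB : gen_ticket_number_alt count series length =
      (List.range limitN).map (fun (kN : Nat) =>
        String.ofList (PySem.Chars.zfill (PySem.Int.toChars
            (PySem.Int.mod ((kN : Nat) : Int) (perN : Int) + 1)) length
          ++ ' ' :: PySem.List.pyGetD ((List.range (R + M)).map sv)
              (PySem.Int.floordiv ((kN : Nat) : Int) (perN : Int)) [])) := by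
    unfold gen_ticket_number_alt
    rw [pvAlphB_eq, hg0, hg1]
    dsimp only
    rw [hsliceF, hsliceS, hrows0, hrows1, hpairsNF, hperC]
    have hlenp : ((((List.range (R + M)).map sv).length : Nat) : Int) * (perN : Int) = ((tot : Nat) : Int) := by
      rw [List.length_map, List.length_range, htot]
      push_cast
      ring
    rw [hlenp, pvForK_eq, PySem.List.pyRange_one]
    rw [show (((tot:Nat):Int) - 0).toNat = tot by omega]
    rw [List.takeWhile_map, List.map_map]
    have hpred : ((fun (x : Int) => x != count) ∘ fun (k : Nat) => (0 : Int) + (k : Int)) =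
        (fun (kN : Nat) => ((kN : Nat) : Int) != count) := by
      funext kN
      norm_num
    rw [hpred, pv_takeWhile_range]
    have hif : (if 0 ≤ count ∧ count < (tot : Int) then count.toNat else tot) = limitN := by
      rw [hlimitN]
      split_ifs <;> omega
    rw [hif]
    apply List.map_congr_left
    intro kN _
    simp only [Function.comp]
    rw [show (0 : Int) + (kN : Int) = ((kN : Nat) : Int) by ring]
  -- conclude: both are the same range-map
  rw [hA, hB, ← List.map_take, List.take_range, min_eq_left hlimle]
  apply List.map_congr_left
  intro kN hkN
  have hkN' : kN < limitN := List.mem_range.mp hkN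
  have hktot : kN < tot := lt_of_lt_of_le hkN' hlimle
  have hperpos : 0 < perN := by
    rcases Nat.eq_zero_or_pos perN with h0 | h0
    · rw [htot, h0, Nat.mul_zero] at hktot; omega
    · exact h0
  have hdivlt : kN / perN < R + M := by
    rw [htot] at hktot
    exact (Nat.div_lt_iff_lt_mul hperpos).mpr hktot
  rw [PySem.Int.floordiv_natCast, PySem.Int.mod_natCast]
  rw [PySem.List.pyGetD_natCast, PySem.List.getD_map_range _ _ _ _ hdivlt]
  rw [hfA]
  rfl
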